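-- pv_equiv track=rewrite | github.com/lkhrup/PXX | main.py | split_block_double_separator
-- ===== SOURCE A (Python) =====
-- def split_block_double_separator(lines, separator):
--     blocks = []
--     block = []
--     num_lines = len(lines)
--     for index in range(1, num_lines):
--         if index + 2 < num_lines and separator in lines[index] and separator in lines[index + 2]:
--             if block:
--                 blocks.append('\n'.join(block))
--             block = [lines[index]]
--         else:
--             block.append(lines[index])
--     if block:
--         blocks.append('\n'.join(block))
--     return blocks
-- ===== SOURCE B (Python) =====
-- def split_block_double_separator(lines, separator):
--     n = len(lines)
--     if n <= 1:
--         return []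
--     starts = [1]
--     for i in range(2, n):
--         if i + 2 < n and separator in lines[i] and separator in lines[i + 2]:
--             starts.append(i)
--     return ['\n'.join(lines[a:b]) for a, b in zip(starts, starts[1:] + [n])]
-- ===== Notes on version B (the rewrite author's own statement) =====
-- stated objective: alternative
-- what changed: Replaced A's incremental running-buffer loop (flush block on each double-separator boundary) by a two-phase index-then-slice decomposition: one pass collects block-start indices, then consecutive starts are zipped to slice and join the segments.
import Mathlib
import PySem

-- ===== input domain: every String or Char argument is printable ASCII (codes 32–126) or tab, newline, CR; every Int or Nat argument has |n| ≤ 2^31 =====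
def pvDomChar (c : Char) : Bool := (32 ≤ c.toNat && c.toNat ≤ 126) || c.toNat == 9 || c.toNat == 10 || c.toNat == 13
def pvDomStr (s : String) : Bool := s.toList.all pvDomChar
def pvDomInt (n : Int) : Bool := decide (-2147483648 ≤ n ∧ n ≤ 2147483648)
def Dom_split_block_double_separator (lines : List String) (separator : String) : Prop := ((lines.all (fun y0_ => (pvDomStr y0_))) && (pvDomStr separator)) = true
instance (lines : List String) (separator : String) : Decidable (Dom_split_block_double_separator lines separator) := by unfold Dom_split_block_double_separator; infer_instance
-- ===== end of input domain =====

-- B replaces A's running-buffer flush loop by an index-then-slice decomposition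
-- (collect block-start indices once, then slice-and-join consecutive segments); objective: alternative.

-- ===== PORT A =====
def split_block_double_separator (lines : List String) (separator : String) : List String :=
  let numLines : Int := (lines.length : Int)
  let r := (PySem.List.pyRange 1 numLines).foldl
    (fun (st : List String × List String) index =>
      if (decide (index + 2 < numLines) && PySem.Str.isIn separator (PySem.List.pyGetD lines index "")
            && PySem.Str.isIn separator (PySem.List.pyGetD lines (index + 2) "")) = true then
        ((if st.2 = [] then st.1 else st.1 ++ [PySem.Str.join "\n" st.2]),
         [PySem.List.pyGetD lines index ""])
      else
        (st.1, st.2 ++ [PySem.List.pyGetD lines index ""]))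
    ([], [])
  if r.2 = [] then r.1 else r.1 ++ [PySem.Str.join "\n" r.2]

-- ===== PORT B =====
def split_block_double_separator_alt (lines : List String) (separator : String) : List String :=
  let n : Int := (lines.length : Int)
  if n ≤ 1 then []
  else
    let starts := (PySem.List.pyRange 2 n).foldl
      (fun (acc : List Int) i =>
        if (decide (i + 2 < n) && PySem.Str.isIn separator (PySem.List.pyGetD lines i "")
              && PySem.Str.isIn separator (PySem.List.pyGetD lines (i + 2) "")) = true then
          acc ++ [i]
        else acc)
      [1]
    (starts.zip (starts.drop 1 ++ [n])).map
      (fun ab => PySem.Str.join "\n" (PySem.List.slice lines (some ab.1) (some ab.2)))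

-- ===== PRECONDITION & SPEC =====
def Spec_split_block_double_separator (lines : List String) (separator : String) (out : List String) : Prop := out = split_block_double_separator_alt lines separator
instance (lines : List String) (separator : String) (out : List String) : Decidable (Spec_split_block_double_separator lines separator out) := by unfold Spec_split_block_double_separator; infer_instance

-- ===== CLAIM (what is proved, stated in full; the proofs are below) =====
def Claim_equal_split_block_double_separator : Prop := ∀ (lines : List String) (separator : String), Dom_split_block_double_separator lines separator → Spec_split_block_double_separator lines separator (split_block_double_separator lines separator)

-- ===== LEMMAS AND PROOFS =====

-- the boundary test on a Nat index
def pvBnd (lines : List String) (separator : String) (j : Nat) : Bool :=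
  decide (j + 2 < lines.length) && PySem.Str.isIn separator (lines.getD j "")
    && PySem.Str.isIn separator (lines.getD (j + 2) "")

-- the same test as both ports compute it, on an Int index
def pvCond (lines : List String) (separator : String) (i : Int) : Bool :=
  decide (i + 2 < (lines.length : Int)) && PySem.Str.isIn separator (PySem.List.pyGetD lines i "")
    && PySem.Str.isIn separator (PySem.List.pyGetD lines (i + 2) "")

lemma pvCond_natCast (lines : List String) (separator : String) (j : Nat) :
    pvCond lines separator (j : Int) = pvBnd lines separator j := by
  unfold pvCond pvBnd
  have h2 : ((j : Int) + 2) = ((j + 2 : Nat) : Int) := by push_cast; ring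
  rw [h2, PySem.List.pyGetD_natCast, PySem.List.pyGetD_natCast]
  congr 2
  simp [decide_eq_decide]
  omega

-- the slice lines[s:j]
def pvSeg (lines : List String) (s j : Nat) : List String := (lines.drop s).take (j - s)

-- the list of joined blocks produced from position j onward, current block starting at s
def pvSegs (lines : List String) (separator : String) (s j : Nat) : List String :=
  if _h : j < lines.length then
    if pvBnd lines separator j then
      PySem.Str.join "\n" (pvSeg lines s j) :: pvSegs lines separator j (j + 1)
    else pvSegs lines separator s (j + 1)
  else [PySem.Str.join "\n" (pvSeg lines s lines.length)]
termination_by lines.length - j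
decreasing_by all_goals omega

lemma pvSeg_append (lines : List String) (s j : Nat) (hsj : s ≤ j) (hj : j < lines.length) :
    pvSeg lines s j ++ [lines.getD j ""] = pvSeg lines s (j + 1) := by
  unfold pvSeg
  have h1 : j + 1 - s = (j - s) + 1 := by omega
  rw [h1, List.take_succ]
  congr 1
  have : (lines.drop s)[j - s]? = lines[j]? := by
    rw [List.getElem?_drop]; congr 1; omega
  rw [this, List.getElem?_eq_getElem hj]
  simp [List.getD_eq_getElem?_getD, List.getElem?_eq_getElem hj]

lemma pvSeg_single (lines : List String) (j : Nat) (hj : j < lines.length) :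
    pvSeg lines j (j + 1) = [lines.getD j ""] := by
  rw [← pvSeg_append lines j j le_rfl hj]
  simp [pvSeg]

lemma pvSeg_ne_nil (lines : List String) (s j : Nat) (hsj : s < j) (hs : s < lines.length) :
    pvSeg lines s j ≠ [] := by
  unfold pvSeg
  intro h
  have := congrArg List.length h
  simp at this
  omega

-- A's loop step (identical to the lambda in port A)
def pvStepA (lines : List String) (separator : String)
    (st : List String × List String) (index : Int) : List String × List String :=
  if pvCond lines separator index = true then
    ((if st.2 = [] then st.1 else st.1 ++ [PySem.Str.join "\n" st.2]),
     [PySem.List.pyGetD lines index ""])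
  else
    (st.1, st.2 ++ [PySem.List.pyGetD lines index ""])

lemma runA_eq (lines : List String) (separator : String) :
    ∀ (k s j : Nat) (blocks : List String), s < j → j ≤ lines.length → lines.length - j = k →
    (let r := (PySem.List.pyRange (j : Int) (lines.length : Int)).foldl
        (pvStepA lines separator) (blocks, pvSeg lines s j)
     if r.2 = [] then r.1 else r.1 ++ [PySem.Str.join "\n" r.2])
      = blocks ++ pvSegs lines separator s j := by
  intro k
  induction k with
  | zero =>
    intro s j blocks hsj hj hk
    have hjn : j = lines.length := by omega
    subst hjn
    rw [PySem.List.pyRange_one_eq_nil le_rfl]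
    simp only [List.foldl_nil]
    have hne := pvSeg_ne_nil lines s lines.length hsj (by omega)
    rw [pvSegs]
    simp [hne]
  | succ k ih =>
    intro s j blocks hsj hj hk
    have hjn : j < lines.length := by omega
    have hcast : ((j : Int) + 1) = ((j + 1 : Nat) : Int) := by push_cast; ring
    rw [PySem.List.pyRange_one_cons (by exact_mod_cast hjn), List.foldl_cons, hcast]
    have hne := pvSeg_ne_nil lines s j hsj (by omega)
    rw [pvSegs]
    simp only [hjn, dif_pos]
    by_cases hb : pvBnd lines separator j
    · have hstep : pvStepA lines separator (blocks, pvSeg lines s j) (j : Int)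
          = (blocks ++ [PySem.Str.join "\n" (pvSeg lines s j)], pvSeg lines j (j + 1)) := by
        unfold pvStepA
        rw [pvCond_natCast, hb]
        simp [hne, PySem.List.pyGetD_natCast, pvSeg_single lines j hjn]
      rw [hstep, ih j (j + 1) _ (by omega) (by omega) (by omega), hb]
      simp
    · have hstep : pvStepA lines separator (blocks, pvSeg lines s j) (j : Int)
          = (blocks, pvSeg lines s (j + 1)) := by
        unfold pvStepA
        rw [pvCond_natCast]
        simp only [hb, Bool.false_eq_true, if_false, PySem.List.pyGetD_natCast]
        rw [pvSeg_append lines s j (by omega) hjn]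
      rw [hstep, ih s (j + 1) blocks (by omega) (by omega) (by omega)]
      simp [hb]

-- B's filtered start list from position j onward
def pvStarts (lines : List String) (separator : String) (j : Nat) : List Int :=
  (PySem.List.pyRange (j : Int) (lines.length : Int)).filter (pvCond lines separator)

lemma pvStarts_step (lines : List String) (separator : String) (j : Nat) (hj : j < lines.length) :
    pvStarts lines separator j =
      if pvBnd lines separator j then (j : Int) :: pvStarts lines separator (j + 1)
      else pvStarts lines separator (j + 1) := by
  unfold pvStarts
  rw [PySem.List.pyRange_one_cons (by exact_mod_cast hj), List.filter_cons]
  have hcast : ((j : Int) + 1) = ((j + 1 : Nat) : Int) := by push_cast; ring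
  rw [hcast, pvCond_natCast]

lemma runB_eq (lines : List String) (separator : String) :
    ∀ (k s j : Nat), s < j → j ≤ lines.length → lines.length - j = k →
    ((((s : Int) :: pvStarts lines separator j).zip
        (pvStarts lines separator j ++ [(lines.length : Int)])).map
      (fun ab => PySem.Str.join "\n" (PySem.List.slice lines (some ab.1) (some ab.2))))
      = pvSegs lines separator s j := by
  intro k
  induction k with
  | zero =>
    intro s j hsj hj hk
    have hjn : j = lines.length := by omega
    subst hjn
    have hnil : pvStarts lines separator lines.length = [] := by
      unfold pvStarts
      rw [PySem.List.pyRange_one_eq_nil le_rfl]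
      rfl
    rw [hnil, pvSegs]
    simp [PySem.List.slice_natCast, pvSeg]
  | succ k ih =>
    intro s j hsj hj hk
    have hjn : j < lines.length := by omega
    rw [pvStarts_step lines separator j hjn, pvSegs]
    simp only [hjn, dif_pos]
    by_cases hb : pvBnd lines separator j
    · rw [if_pos hb, if_pos hb]
      have := ih j (j + 1) (by omega) (by omega) (by omega)
      simp only [List.cons_append, List.zip_cons_cons, List.map_cons] at this ⊢
      rw [this]
      simp [PySem.List.slice_natCast, pvSeg]
    · rw [if_neg hb, if_neg hb]
      exact ih s (j + 1) (by omega) (by omega) (by omega)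

lemma portA_small (lines : List String) (separator : String) (h : lines.length ≤ 1) :
    split_block_double_separator lines separator = [] := by
  simp only [split_block_double_separator]
  rw [PySem.List.pyRange_one_eq_nil (by exact_mod_cast h)]
  simp

lemma portA_big (lines : List String) (separator : String) (h : 2 ≤ lines.length) :
    split_block_double_separator lines separator = pvSegs lines separator 1 2 := by
  simp only [split_block_double_separator]
  rw [show (fun (st : List String × List String) index =>
      if (decide (index + 2 < (lines.length : Int)) && PySem.Str.isIn separator (PySem.List.pyGetD lines index "")
            && PySem.Str.isIn separator (PySem.List.pyGetD lines (index + 2) "")) = true then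
        ((if st.2 = [] then st.1 else st.1 ++ [PySem.Str.join "\n" st.2]),
         [PySem.List.pyGetD lines index ""])
      else
        (st.1, st.2 ++ [PySem.List.pyGetD lines index ""]))
      = pvStepA lines separator from rfl]
  have h1 : (1 : Int) < (lines.length : Int) := by exact_mod_cast (by omega : 1 < lines.length)
  rw [PySem.List.pyRange_one_cons h1, List.foldl_cons]
  have hfirst : pvStepA lines separator ([], []) 1 = (([] : List String), pvSeg lines 1 2) := by
    have hget : PySem.List.pyGetD lines (1 : Int) "" = lines.getD 1 "" := by
      exact_mod_cast PySem.List.pyGetD_natCast lines 1 ""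
    have hseg : pvSeg lines 1 2 = [lines.getD 1 ""] := pvSeg_single lines 1 (by omega)
    unfold pvStepA
    by_cases hc : pvCond lines separator 1 = true
    · simp [hc, hget, hseg]
    · simp [hc, hget, hseg]
  rw [hfirst, show ((1 : Int) + 1) = ((2 : Nat) : Int) from by norm_num]
  exact (runA_eq lines separator (lines.length - 2) 1 2 [] (by omega) (by omega) rfl).trans
    (List.nil_append _)

lemma portB_big (lines : List String) (separator : String) (h : 2 ≤ lines.length) :
    split_block_double_separator_alt lines separator = pvSegs lines separator 1 2 := by
  simp only [split_block_double_separator_alt]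
  have hn : ¬ ((lines.length : Int) ≤ 1) := by
    push_neg; exact_mod_cast (by omega : 1 < lines.length)
  rw [if_neg hn]
  rw [show (fun (acc : List Int) i =>
        if (decide (i + 2 < (lines.length : Int)) && PySem.Str.isIn separator (PySem.List.pyGetD lines i "")
              && PySem.Str.isIn separator (PySem.List.pyGetD lines (i + 2) "")) = true then
          acc ++ [i]
        else acc)
      = (fun (acc : List Int) i => if pvCond lines separator i = true then acc ++ [i] else acc)
      from rfl]
  rw [PySem.List.foldl_append_if (pvCond lines separator) (fun i : Int => i)
      (PySem.List.pyRange 2 (lines.length : Int)) [1]]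
  have hstarts : ([(1 : Int)] ++ List.map (fun i : Int => i)
        (List.filter (pvCond lines separator) (PySem.List.pyRange 2 (lines.length : Int))))
      = (1 : Int) :: pvStarts lines separator 2 := by
    simp [pvStarts]
  rw [hstarts]
  have := runB_eq lines separator (lines.length - 2) 1 2 (by omega) (by omega) rfl
  have hc1 : ((1 : Nat) : Int) = (1 : Int) := by norm_num
  have hc2 : ((2 : Nat) : Int) = (2 : Int) := by norm_num
  rw [hc1] at this
  unfold pvStarts at this ⊢
  rw [hc2] at this
  simpa using this

lemma portB_small (lines : List String) (separator : String) (h : lines.length ≤ 1) :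
    split_block_double_separator_alt lines separator = [] := by
  simp only [split_block_double_separator_alt]
  rw [if_pos (by exact_mod_cast h)]

-- ===== VERDICT (by name: the statement is the Claim_ definition above) =====
theorem split_block_double_separator_spec : Claim_equal_split_block_double_separator := by
  intro lines separator _
  unfold Spec_split_block_double_separator
  by_cases h : 2 ≤ lines.length
  · rw [portA_big lines separator h, portB_big lines separator h]
  · rw [portA_small lines separator (by omega), portB_small lines separator (by omega)]
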